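-- pv_equiv track=rewrite | github.com/YinDFY/CodeAudit | QTApplication/MainWindow.py | highlight_code
-- ===== SOURCE A (Python) =====
-- def highlight_code(content, begin, end):
--     lines = content.split('\n')
--     highlighted_lines = []
--     for i, line in enumerate(lines, start=1):
--         if begin <= i <= end:
--             highlighted_lines.append(f"<span class='highlight' style='background-color: red;'>{line}</span>")
--         else:
--             highlighted_lines.append(f"<span class='normal'>{line}</span>")
--     highlighted_content = "<pre>" + "\n".join(highlighted_lines) + "</pre>"
--     return highlighted_content
-- ===== SOURCE B (Python) =====
-- def highlight_code(content, begin, end):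
--     # Single streaming pass over the characters: no split(), no list of lines.
--     def opener(i):
--         return ("<span class='highlight' style='background-color: red;'>"
--                 if begin <= i <= end else "<span class='normal'>")
--     pieces = ["<pre>", opener(1)]
--     line_no = 1
--     for ch in content:
--         if ch == '\n':
--             line_no += 1
--             pieces.append("</span>\n")
--             pieces.append(opener(line_no))
--         else:
--             pieces.append(ch)
--     pieces.append("</span></pre>")
--     return ''.join(pieces)
-- ===== Notes on version B (the rewrite author's own statement) =====
-- stated objective: alternative
-- what changed: Replaces split-into-lines plus a per-line wrapping loop by a single character-level streaming scan that emits span open/close tags at newlines while tracking the current line number.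
import Mathlib
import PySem

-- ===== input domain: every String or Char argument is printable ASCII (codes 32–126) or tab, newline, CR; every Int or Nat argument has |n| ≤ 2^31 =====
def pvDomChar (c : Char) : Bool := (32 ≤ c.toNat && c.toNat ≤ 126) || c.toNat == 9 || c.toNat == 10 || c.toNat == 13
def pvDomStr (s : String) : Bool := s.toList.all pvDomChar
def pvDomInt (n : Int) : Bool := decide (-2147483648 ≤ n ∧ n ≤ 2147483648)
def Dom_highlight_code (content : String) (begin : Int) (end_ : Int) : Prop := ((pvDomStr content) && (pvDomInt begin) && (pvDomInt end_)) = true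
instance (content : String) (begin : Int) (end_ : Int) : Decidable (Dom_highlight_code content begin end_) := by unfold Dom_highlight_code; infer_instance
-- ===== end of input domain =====

-- B replaces A's split-into-lines + per-line wrapping loop by a single character-level
-- streaming scan emitting span tags at newlines; objective: alternative algorithm.


-- ===== PORT A =====
def pvHl (l : String) : String := "<span class='highlight' style='background-color: red;'>" ++ l ++ "</span>"
def pvNorm (l : String) : String := "<span class='normal'>" ++ l ++ "</span>"

def highlight_code (content : String) (begin : Int) (end_ : Int) : String :=
  let lines := (PySem.Str.split? content "\n").getD []
  let highlighted_lines := (PySem.List.enumerate lines 1).foldl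
    (fun acc p => if begin ≤ p.1 ∧ p.1 ≤ end_ then acc ++ [pvHl p.2] else acc ++ [pvNorm p.2]) []
  "<pre>" ++ PySem.Str.join "\n" highlighted_lines ++ "</pre>"

-- ===== PORT B =====
-- B's `opener(i)` helper (over List Char; B joins raw pieces, ported as char-list accumulation)
def pvOpener (b e i : Int) : List Char :=
  if b ≤ i ∧ i ≤ e then "<span class='highlight' style='background-color: red;'>".toList
  else "<span class='normal'>".toList

-- B's loop body: one step of the streaming scan (state = current line number, pieces so far)
def pvStep (b e : Int) (st : Int × List Char) (ch : Char) : Int × List Char :=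
  if ch = '\n' then (st.1 + 1, st.2 ++ "</span>\n".toList ++ pvOpener b e (st.1 + 1))
  else (st.1, st.2 ++ [ch])

def highlight_code_alt (content : String) (begin : Int) (end_ : Int) : String :=
  let st := content.toList.foldl (pvStep begin end_) (1, "<pre>".toList ++ pvOpener begin end_ 1)
  String.ofList (st.2 ++ "</span></pre>".toList)

-- ===== PRECONDITION & SPEC =====
def Spec_highlight_code (content : String) (begin : Int) (end_ : Int) (out : String) : Prop := out = highlight_code_alt content begin end_
instance (content : String) (begin : Int) (end_ : Int) (out : String) : Decidable (Spec_highlight_code content begin end_ out) := by unfold Spec_highlight_code; infer_instance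

-- ===== CLAIM (what is proved, stated in full; the proofs are below) =====
def Claim_equal_highlight_code : Prop := ∀ (content : String) (begin : Int) (end_ : Int), Dom_highlight_code content begin end_ → Spec_highlight_code content begin end_ (highlight_code content begin end_)

-- ===== LEMMAS AND PROOFS =====

-- split of a char list on '\n', structurally
def splitNL : List Char → List (List Char)
  | [] => [[]]
  | c :: cs => if c = '\n' then [] :: splitNL cs else (splitNL cs).modifyHead (c :: ·)

lemma splitNL_ne_nil (cs : List Char) : splitNL cs ≠ [] := by
  induction cs with
  | nil => simp [splitNL]
  | cons c cs ih =>
    simp only [splitNL]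
    split
    · simp
    · cases h : splitNL cs with
      | nil => exact absurd h ih
      | cons a t => simp [List.modifyHead]

lemma splitOn_go_eq : ∀ (fuel : Nat) (l cur : List Char) (acc : List (List Char)),
    l.length ≤ fuel →
    PySem.Chars.splitOn.go ['\n'] fuel l cur acc
      = acc.reverse ++ (splitNL l).modifyHead (cur.reverse ++ ·) := by
  intro fuel
  induction fuel with
  | zero =>
    intro l cur acc h
    have : l = [] := by cases l <;> simp_all
    subst this
    simp [PySem.Chars.splitOn.go, splitNL, List.modifyHead]
  | succ fuel ih =>
    intro l cur acc h
    cases l with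
    | nil => simp [PySem.Chars.splitOn.go, splitNL, List.modifyHead]
    | cons c rest =>
      simp only [PySem.Chars.splitOn.go]
      by_cases hc : c = '\n'
      · subst hc
        rw [if_pos (by simp [List.isPrefixOf])]
        have hdrop : List.drop ['\n'].length ('\n' :: rest) = rest := rfl
        rw [hdrop, ih rest [] _ (by simpa using Nat.le_of_succ_le_succ h)]
        cases hs : splitNL rest <;> simp [splitNL, hs, List.modifyHead]
      · rw [if_neg (by simp only [List.isPrefixOf, Bool.and_eq_true, beq_iff_eq]; exact fun hh => hc hh.1.symm)]
        rw [ih rest (c :: cur) acc (by simpa using Nat.le_of_succ_le_succ h)]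
        simp only [splitNL, if_neg hc, List.reverse_cons]
        congr 1
        cases hs : splitNL rest <;> simp [List.modifyHead]

lemma splitOn_eq_splitNL (cs : List Char) : PySem.Chars.splitOn cs ['\n'] = splitNL cs := by
  rw [PySem.Chars.splitOn, splitOn_go_eq (cs.length + 1) cs [] [] (by omega)]
  cases h : splitNL cs <;> simp [List.modifyHead]

-- enumerate commutes with mapping the payload
lemma enumerate_map {α β : Type} (f : α → β) (xs : List α) : ∀ (s : Int),
    PySem.List.enumerate (xs.map f) s = (PySem.List.enumerate xs s).map (fun p => (p.1, f p.2)) := by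
  induction xs with
  | nil => intro s; simp [PySem.List.enumerate]
  | cons x xs ih => intro s; simp [PySem.List.enumerate_cons, ih]

-- B's streamed tail after the opening tag of line i
def pvBody (b e : Int) : List Char → Int → List Char
  | [], _ => []
  | c :: cs, i =>
    if c = '\n' then "</span>\n".toList ++ pvOpener b e (i + 1) ++ pvBody b e cs (i + 1)
    else c :: pvBody b e cs i

lemma fold_eq_body (b e : Int) : ∀ (cs : List Char) (i : Int) (a : List Char),
    (cs.foldl (pvStep b e) (i, a)).2 = a ++ pvBody b e cs i := by
  intro cs
  induction cs with
  | nil => intro i a; simp [pvBody]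
  | cons c cs ih =>
    intro i a
    by_cases hc : c = '\n'
    · subst hc
      simp only [List.foldl_cons, pvStep, pvBody, ih]
      simp
    · simp only [List.foldl_cons, pvStep, if_neg hc, pvBody, ih]
      simp

-- A's wrapped line, over chars
def pvWrapC (b e : Int) (p : Int × List Char) : List Char :=
  pvOpener b e p.1 ++ p.2 ++ "</span>".toList

-- core: A's join-of-wrapped-lines equals B's stream
lemma key (b e : Int) : ∀ (cs : List Char) (i : Int),
    PySem.Chars.join ['\n'] ((PySem.List.enumerate (splitNL cs) i).map (pvWrapC b e))
      = pvOpener b e i ++ pvBody b e cs i ++ "</span>".toList := by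
  intro cs
  induction cs with
  | nil =>
    intro i
    simp [splitNL, PySem.List.enumerate_cons, PySem.List.enumerate_nil, List.map_cons,
      PySem.Chars.join_singleton, pvWrapC, pvBody]
  | cons c cs ih =>
    intro i
    obtain ⟨h, t, ht⟩ : ∃ h t, splitNL cs = h :: t := by
      cases hs : splitNL cs with
      | nil => exact absurd hs (splitNL_ne_nil cs)
      | cons h t => exact ⟨h, t, rfl⟩
    by_cases hc : c = '\n'
    · subst hc
      have e1 : splitNL ('\n' :: cs) = [] :: h :: t := by simp [splitNL, ht]
      have ihx := ih (i + 1)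
      rw [ht, PySem.List.enumerate_cons, List.map_cons] at ihx
      rw [e1, PySem.List.enumerate_cons, PySem.List.enumerate_cons, List.map_cons,
        List.map_cons, PySem.Chars.join_cons_cons, ihx]
      have hclose : "</span>".toList ++ ['\n'] = "</span>\n".toList := rfl
      simp only [pvWrapC, pvBody, List.append_assoc, List.append_nil, List.nil_append,
        List.cons_append]
      rw [← hclose]
      simp [List.append_assoc]
    · have e1 : splitNL (c :: cs) = (c :: h) :: t := by
        simp [splitNL, hc, ht, List.modifyHead]
      have ihx := ih i
      rw [ht, PySem.List.enumerate_cons, List.map_cons] at ihx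
      rw [e1, PySem.List.enumerate_cons, List.map_cons]
      cases t with
      | nil =>
        rw [PySem.List.enumerate_nil, List.map_nil] at ihx ⊢
        rw [PySem.Chars.join_singleton] at ihx ⊢
        simp only [pvWrapC, List.append_assoc, List.cons_append] at ihx ⊢
        have h2 := List.append_cancel_left ihx
        simp only [pvBody, if_neg hc, List.cons_append, h2]
      | cons q t' =>
        rw [PySem.List.enumerate_cons, List.map_cons] at ihx ⊢
        rw [PySem.Chars.join_cons_cons] at ihx ⊢
        simp only [pvWrapC, List.append_assoc, List.cons_append] at ihx ⊢
        have h2 := List.append_cancel_left ihx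
        simp only [pvBody, if_neg hc, List.cons_append, h2]

-- A's loop builds exactly the map of the branch over the enumeration
lemma foldA_eq_map (b e : Int) (xs : List (Int × String)) :
    xs.foldl (fun acc p => if b ≤ p.1 ∧ p.1 ≤ e then acc ++ [pvHl p.2] else acc ++ [pvNorm p.2]) []
      = xs.map (fun p => if b ≤ p.1 ∧ p.1 ≤ e then pvHl p.2 else pvNorm p.2) := by
  have hf : (fun (acc : List String) (p : Int × String) =>
      if b ≤ p.1 ∧ p.1 ≤ e then acc ++ [pvHl p.2] else acc ++ [pvNorm p.2])
      = (fun acc p => acc ++ [if b ≤ p.1 ∧ p.1 ≤ e then pvHl p.2 else pvNorm p.2]) := by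
    funext acc p; split <;> rfl
  rw [hf, PySem.List.foldl_append_singleton_eq_map]
  simp

theorem highlight_code_spec : Claim_equal_highlight_code := by
  intro content b e _
  show highlight_code content b e = highlight_code_alt content b e
  apply String.toList_inj.mp
  simp only [highlight_code, highlight_code_alt, foldA_eq_map]
  have hsplit : (PySem.Str.split? content "\n").getD []
      = (splitNL content.toList).map String.ofList := by
    simp [PySem.Str.split?, PySem.Chars.split?, splitOn_eq_splitNL]
  rw [hsplit, enumerate_map]
  rw [fold_eq_body b e content.toList 1 ("<pre>".toList ++ pvOpener b e 1)]
  simp only [String.toList_append, PySem.Str.toList_join, String.toList_ofList, List.map_map]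
  have hmap : ∀ p : Int × List Char,
      (String.toList ∘ (fun q : Int × String => if b ≤ q.1 ∧ q.1 ≤ e then pvHl q.2 else pvNorm q.2) ∘
        fun p : Int × List Char => (p.1, String.ofList p.2)) p = pvWrapC b e p := by
    intro p
    by_cases hp : b ≤ p.1 ∧ p.1 ≤ e <;>
      simp [pvHl, pvNorm, pvWrapC, pvOpener, hp, String.toList_append]
  rw [List.map_congr_left (fun p _ => hmap p)]
  have hn : ("\n" : String).toList = ['\n'] := rfl
  rw [hn, key b e content.toList 1]
  have hsp : "</span></pre>".toList = "</span>".toList ++ "</pre>".toList := rfl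
  rw [hsp]
  simp [List.append_assoc]
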